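-- pv_equiv track=rewrite | github.com/AnnaWojciechowska/GEO4300_project | reading_data/server_download_and_store.py | extract_header_and_data
-- ===== SOURCE A (Python) =====
-- def extract_header_and_data(lines):
--     header, data = [], 'timestamp  level\n'
--     for line in lines:
--         if line.startswith("#"):
--             header.append(line)
--         else:
--             data += line + '\n'
--     #pack header as dictionary
--     header_dict = {}
--     for line in header:
--         if line.startswith('#'):
--             line = line.strip('#')
--             res = line.split(':')
--             header_dict[res[0].strip()] = res[1].strip()
--     return header_dict, data
-- ===== SOURCE B (Python) =====
-- def extract_header_and_data(lines):
--     # single fused pass: parse header lines into the dict immediately (no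
--     # intermediate header list, no second loop); data chunks are collected
--     # in a list and joined once at the end.
--     header_dict = {}
--     chunks = ['timestamp  level\n']
--     for line in lines:
--         if line.startswith('#'):
--             parts = line.strip('#').split(':')
--             header_dict[parts[0].strip()] = parts[1].strip()
--         else:
--             chunks.append(line + '\n')
--     return header_dict, ''.join(chunks)
-- ===== Notes on version B (the rewrite author's own statement) =====
-- stated objective: simpler
-- what changed: A's two staged passes (collect header lines in a list, then a second loop parsing them into the dict) and its string += are replaced by one fused pass that parses each header line immediately into the dict and appends data chunks joined once at the end.
import Mathlib
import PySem

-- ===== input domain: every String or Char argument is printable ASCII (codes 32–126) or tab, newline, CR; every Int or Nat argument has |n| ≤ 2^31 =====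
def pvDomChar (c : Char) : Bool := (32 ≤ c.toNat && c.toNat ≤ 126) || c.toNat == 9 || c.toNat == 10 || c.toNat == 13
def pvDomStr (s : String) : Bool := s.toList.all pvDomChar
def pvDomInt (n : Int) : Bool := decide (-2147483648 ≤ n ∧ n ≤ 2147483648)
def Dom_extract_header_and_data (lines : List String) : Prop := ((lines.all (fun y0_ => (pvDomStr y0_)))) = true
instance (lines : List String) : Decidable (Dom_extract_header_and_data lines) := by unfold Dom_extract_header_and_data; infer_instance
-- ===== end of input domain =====

-- B fuses A's two staged passes into ONE pass: each '#' line is parsed straight into the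
-- dict (A's intermediate header list and second loop disappear) and data chunks are
-- collected in a list joined once at the end (instead of A's string +=). Objective: simpler.

-- ===== PORT A =====
-- first loop: partition into header list and data string (string +=)
def pvStepA (st : List String × String) (line : String) : List String × String :=
  if PySem.Str.startswith line "#" then (st.1 ++ [line], st.2) else (st.1, st.2 ++ line ++ "\n")

-- second loop: parse each collected header line into the dict (res[1] via pyGet?;
-- outside Pre_ Python raises IndexError there)
def pvHdrStepA (d : PySem.Dict String String) (line : String) : PySem.Dict String String :=
  if PySem.Str.startswith line "#" then
    let line2 := PySem.Str.stripChars line "#"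
    let res := (PySem.Str.split? line2 ":").getD []
    d.insert (PySem.Str.strip ((PySem.List.pyGet? res 0).getD ""))
             (PySem.Str.strip ((PySem.List.pyGet? res 1).getD ""))
  else d

def extract_header_and_data (lines : List String) : (List (String × String)) × String :=
  let hd := lines.foldl pvStepA ([], "timestamp  level\n")
  ((hd.1.foldl pvHdrStepA PySem.Dict.empty).items, hd.2)

-- ===== PORT B =====
-- single fused pass: state = (header_dict, chunks); parts[1] via pyGet? (outside Pre_
-- Python B raises IndexError there, like A)
def pvStepB (st : PySem.Dict String String × List String) (line : String) :
    PySem.Dict String String × List String :=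
  if PySem.Str.startswith line "#" then
    let parts := (PySem.Str.split? (PySem.Str.stripChars line "#") ":").getD []
    (st.1.insert (PySem.Str.strip ((PySem.List.pyGet? parts 0).getD ""))
                 (PySem.Str.strip ((PySem.List.pyGet? parts 1).getD "")), st.2)
  else (st.1, st.2 ++ [line ++ "\n"])

def extract_header_and_data_alt (lines : List String) : (List (String × String)) × String :=
  let st := lines.foldl pvStepB (PySem.Dict.empty, ["timestamp  level\n"])
  (st.1.items, PySem.Str.join "" st.2)

-- ===== PRECONDITION & SPEC =====
-- Pre_ excludes exactly the inputs on which both Pythons raise IndexError: a line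
-- starting with '#' whose strip('#') contains no ':' makes res[1]/parts[1] fail.
def Pre_extract_header_and_data (lines : List String) : Prop :=
  ∀ l ∈ lines, PySem.Str.startswith l "#" = true →
    PySem.Str.isIn ":" (PySem.Str.stripChars l "#") = true
instance (lines : List String) : Decidable (Pre_extract_header_and_data lines) := by unfold Pre_extract_header_and_data; infer_instance

def pvWitness_extract_header_and_data : List String := ["#station: Oslo", "12 3.4"]

def Spec_extract_header_and_data (lines : List String) (out : (List (String × String)) × String) : Prop := out = extract_header_and_data_alt lines
instance (lines : List String) (out : (List (String × String)) × String) : Decidable (Spec_extract_header_and_data lines out) := by unfold Spec_extract_header_and_data; infer_instance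

-- ===== CLAIM (what is proved, stated in full; the proofs are below) =====
def Claim_equal_extract_header_and_data : Prop := ∀ (lines : List String), Dom_extract_header_and_data lines → Pre_extract_header_and_data lines → Spec_extract_header_and_data lines (extract_header_and_data lines)

-- ===== LEMMAS AND PROOFS =====

-- ''.join over a cons
theorem pv_join_cons (s : String) (l : List String) :
    PySem.Str.join "" (s :: l) = s ++ PySem.Str.join "" l := by
  cases l with
  | nil => simp [PySem.Str.join, PySem.Chars.join, List.intercalate]
  | cons t ts => simp [PySem.Str.join, PySem.Chars.join_cons_cons]

-- canonical form of A's first loop: filter for headers, ++ for data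
theorem pv_foldA (lines : List String) (h : List String) (d : String) :
    lines.foldl pvStepA (h, d) =
      (h ++ lines.filter (fun l => PySem.Str.startswith l "#"),
       d ++ PySem.Str.join "" ((lines.filter (fun l => !PySem.Str.startswith l "#")).map (fun l => l ++ "\n"))) := by
  induction lines generalizing h d with
  | nil => simp [PySem.Str.join, PySem.Chars.join, List.intercalate]
  | cons x xs ih =>
    rw [List.foldl_cons]
    by_cases hx : PySem.Str.startswith x "#" = true
    · have hstep : pvStepA (h, d) x = (h ++ [x], d) := by unfold pvStepA; rw [if_pos hx]
      rw [hstep, ih,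
          List.filter_cons_of_pos (p := fun l => PySem.Str.startswith l "#") hx,
          List.filter_cons_of_neg (p := fun l => !PySem.Str.startswith l "#") (by simpa using hx),
          List.append_assoc]
      simp
    · have hstep : pvStepA (h, d) x = (h, d ++ x ++ "\n") := by unfold pvStepA; rw [if_neg hx]
      rw [hstep, ih,
          List.filter_cons_of_neg (p := fun l => PySem.Str.startswith l "#") (by simpa using hx),
          List.filter_cons_of_pos (p := fun l => !PySem.Str.startswith l "#") (by simpa using hx),
          List.map_cons, pv_join_cons,
          ← String.append_assoc, ← String.append_assoc]

-- canonical form of B's fused loop: dict fold over the header lines, chunks ++ for data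
theorem pv_foldB (lines : List String) (d : PySem.Dict String String) (ch : List String) :
    lines.foldl pvStepB (d, ch) =
      ((lines.filter (fun l => PySem.Str.startswith l "#")).foldl pvHdrStepA d,
       ch ++ (lines.filter (fun l => !PySem.Str.startswith l "#")).map (fun l => l ++ "\n")) := by
  induction lines generalizing d ch with
  | nil => simp
  | cons x xs ih =>
    rw [List.foldl_cons]
    by_cases hx : PySem.Str.startswith x "#" = true
    · have hstep : pvStepB (d, ch) x = (pvHdrStepA d x, ch) := by
        unfold pvStepB pvHdrStepA; rw [if_pos hx, if_pos hx]
      rw [hstep, ih,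
          List.filter_cons_of_pos (p := fun l => PySem.Str.startswith l "#") hx,
          List.filter_cons_of_neg (p := fun l => !PySem.Str.startswith l "#") (by simpa using hx),
          List.foldl_cons]
    · have hstep : pvStepB (d, ch) x = (d, ch ++ [x ++ "\n"]) := by
        unfold pvStepB; rw [if_neg hx]
      rw [hstep, ih,
          List.filter_cons_of_neg (p := fun l => PySem.Str.startswith l "#") (by simpa using hx),
          List.filter_cons_of_pos (p := fun l => !PySem.Str.startswith l "#") (by simpa using hx),
          List.map_cons, List.append_assoc]
      simp

-- ===== VERDICT (by name: the statement is the Claim_ definition above) =====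
theorem extract_header_and_data_spec : Claim_equal_extract_header_and_data := by
  unfold Claim_equal_extract_header_and_data
  intro lines _ _
  unfold Spec_extract_header_and_data extract_header_and_data extract_header_and_data_alt
  rw [pv_foldA, pv_foldB]
  simp only [List.nil_append]
  rw [List.singleton_append, pv_join_cons]
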